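-- pv_equiv track=rewrite | github.com/Mxt3usz/BioinformaticsWS22 | exercise_sheet2.py | levenshtein_deletions
-- ===== SOURCE A (Python) =====
-- def levenshtein_deletions(sequence1, sequence2):
--     """
--     Implement the function levenshtein_deletion() which takes two sequences
--     and returns the positions of characters from the longest sequences which
--     should be deleted to transform the sequence into the other one.
--     This should be returned as a list of indices (int).
--     If such deletion can not be done the function should return None.
--     Also, if there are no editing operations needed the function should return an empty list.
--     """
--     deletions_indexes = []
--     i = 0
--     i_static = 0
--     if len(sequence1) > len(sequence2):
--         shorter = sequence2
--         longer = sequence1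
--     else:
--         shorter = sequence1
--         longer = sequence2
--
--     while i != len(longer):
--         if i >= len(longer):
--             return None
--         if i >= len(shorter):
--             longer = longer[:i] + longer[i+1:]
--             deletions_indexes += [i_static]
--             i -= 1
--         else:
--             if longer[i] != shorter[i]:
--                 longer = longer[:i] + longer[i+1:]
--                 deletions_indexes += [i_static]
--                 i -= 1
--         i += 1
--         i_static += 1
--     return deletions_indexes if longer == shorter else None
-- ===== SOURCE B (Python) =====
-- def levenshtein_deletions(sequence1, sequence2):
--     if len(sequence1) > len(sequence2):
--         shorter, longer = sequence2, sequence1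
--     else:
--         shorter, longer = sequence1, sequence2
--     deletions = []
--     i = 0
--     for j, c in enumerate(longer):
--         if i < len(shorter) and c == shorter[i]:
--             i += 1
--         else:
--             deletions.append(j)
--     return deletions if i == len(shorter) else None
-- ===== Notes on version B (the rewrite author's own statement) =====
-- stated objective: faster
-- what changed: Replaced the while-loop that repeatedly rebuilds the longer string by slicing (longer = longer[:i] + longer[i+1:]) with a single two-pointer pass over the unmodified strings that records deleted original indices directly.
import Mathlib
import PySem

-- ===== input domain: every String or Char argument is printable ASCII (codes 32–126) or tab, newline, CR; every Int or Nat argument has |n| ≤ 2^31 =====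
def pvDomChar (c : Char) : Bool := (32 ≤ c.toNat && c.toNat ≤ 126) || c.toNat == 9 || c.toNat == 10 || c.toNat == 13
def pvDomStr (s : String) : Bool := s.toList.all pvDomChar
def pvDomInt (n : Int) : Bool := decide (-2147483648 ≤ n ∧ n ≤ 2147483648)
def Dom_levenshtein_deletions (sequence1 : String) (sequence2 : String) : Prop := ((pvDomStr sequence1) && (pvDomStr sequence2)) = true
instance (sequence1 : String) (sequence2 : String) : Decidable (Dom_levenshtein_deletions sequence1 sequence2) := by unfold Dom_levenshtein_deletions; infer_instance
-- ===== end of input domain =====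

-- B replaces A's quadratic slice-and-rebuild while-loop with one linear two-pointer pass (objective: faster).

-- ===== PORT A =====
-- the while-loop of A; fuel only makes the recursion total (it equals the number of
-- remaining iterations + 1, which the loop never exceeds)
def pvLoopA (fuel : Nat) (longer shorter : List Char) (dels : List Int) (i i_static : Int) :
    Option (List Int) :=
  match fuel with
  | 0 => none
  | fuel + 1 =>
    if i = (longer.length : Int) then
      -- loop exit: 'return deletions_indexes if longer == shorter else None'
      if longer = shorter then some dels else none
    else if (longer.length : Int) ≤ i then none
    else if (shorter.length : Int) ≤ i then
      pvLoopA fuel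
        (PySem.List.slice longer none (some i) ++ PySem.List.slice longer (some (i + 1)) none)
        shorter (dels ++ [i_static]) (i - 1 + 1) (i_static + 1)
    else if PySem.List.pyGet? longer i ≠ PySem.List.pyGet? shorter i then
      pvLoopA fuel
        (PySem.List.slice longer none (some i) ++ PySem.List.slice longer (some (i + 1)) none)
        shorter (dels ++ [i_static]) (i - 1 + 1) (i_static + 1)
    else
      pvLoopA fuel longer shorter dels (i + 1) (i_static + 1)

def levenshtein_deletions (sequence1 : String) (sequence2 : String) : Option (List Int) :=
  if (sequence2.toList.length : Int) < (sequence1.toList.length : Int) then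
    pvLoopA (sequence1.toList.length + 1) sequence1.toList sequence2.toList [] 0 0
  else
    pvLoopA (sequence2.toList.length + 1) sequence2.toList sequence1.toList [] 0 0

-- ===== PORT B =====
-- one step of B's for-loop over enumerate(longer)
def pvStepB (shorter : List Char) (st : Nat × List Int) (jc : Int × Char) : Nat × List Int :=
  if st.1 < shorter.length ∧ shorter[st.1]? = some jc.2 then (st.1 + 1, st.2)
  else (st.1, st.2 ++ [jc.1])

def levenshtein_deletions_alt (sequence1 : String) (sequence2 : String) : Option (List Int) :=
  let p : List Char × List Char :=
    if (sequence2.toList.length : Int) < (sequence1.toList.length : Int) then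
      (sequence2.toList, sequence1.toList)
    else (sequence1.toList, sequence2.toList)
  let st := (PySem.List.enumerate p.2 0).foldl (pvStepB p.1) (0, [])
  if st.1 = p.1.length then some st.2 else none

-- ===== PRECONDITION & SPEC =====
def Spec_levenshtein_deletions (sequence1 : String) (sequence2 : String) (out : Option (List Int)) : Prop := out = levenshtein_deletions_alt sequence1 sequence2
instance (sequence1 : String) (sequence2 : String) (out : Option (List Int)) : Decidable (Spec_levenshtein_deletions sequence1 sequence2 out) := by unfold Spec_levenshtein_deletions; infer_instance

-- ===== CLAIM (what is proved, stated in full; the proofs are below) =====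
def Claim_equal_levenshtein_deletions : Prop := ∀ (sequence1 : String) (sequence2 : String), Dom_levenshtein_deletions sequence1 sequence2 → Spec_levenshtein_deletions sequence1 sequence2 (levenshtein_deletions sequence1 sequence2)

-- ===== LEMMAS AND PROOFS =====

-- deletion rewrite: slicing out position i of (take i ++ c :: rest) gives take i ++ rest
lemma pvDel (S : List Char) (i : Nat) (hi : i ≤ S.length) (c : Char) (rest : List Char) :
    PySem.List.slice (S.take i ++ c :: rest) none (some (i : Int)) ++
      PySem.List.slice (S.take i ++ c :: rest) (some ((i : Int) + 1)) none
      = S.take i ++ rest := by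
  rw [PySem.List.slice_to _ (by positivity), PySem.List.slice_from _ (by positivity)]
  have h1 : ((i:Int)).toNat = i := by omega
  have h2 : ((i:Int)+1).toNat = i + 1 := by omega
  rw [h1, h2]
  have hT : (S.take i).length = i := by simp; omega
  rw [List.take_append_of_le_length (by omega)]
  have h3 : i + 1 = (S.take i).length + 1 := by omega
  rw [List.take_take, h3, List.drop_append]
  simp

-- loop invariant: A's current longer string is S.take i ++ rest, where i counts the
-- characters matched so far and rest is the unprocessed original suffix
lemma pvMain (S : List Char) : ∀ (rest : List Char) (i : Nat), i ≤ S.length →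
    ∀ (dels : List Int) (j : Int),
    pvLoopA (rest.length + 1) (S.take i ++ rest) S dels (i : Int) j =
      (let st := (PySem.List.enumerate rest j).foldl (pvStepB S) (i, dels);
       if st.1 = S.length then some st.2 else none) := by
  intro rest
  induction rest with
  | nil =>
    intro i hi dels j
    have hT : (S.take i).length = i := by simp; omega
    simp only [List.append_nil]
    rw [pvLoopA]
    rw [if_pos (by exact_mod_cast hT.symm)]
    simp only [PySem.List.enumerate, List.foldl_nil]
    by_cases h : i = S.length
    · subst h; simp [List.take_length]
    · rw [if_neg, if_neg h]
      intro he
      have := congrArg List.length he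
      simp [hT] at this
      omega
  | cons c rest' IH =>
    intro i hi dels j
    have hT : (S.take i).length = i := by simp; omega
    have hL : (S.take i ++ c :: rest').length = i + rest'.length + 1 := by simp [hT]; omega
    rw [pvLoopA]
    rw [if_neg (by rw [hL]; push_cast; omega), if_neg (by rw [hL]; push_cast; omega)]
    simp only [PySem.List.enumerate_cons, List.foldl_cons, List.length_cons]
    by_cases hiS : S.length ≤ i
    · rw [if_pos (by exact_mod_cast hiS)]
      rw [pvDel S i hi c rest', show (i:Int) - 1 + 1 = (i:Int) from by ring]
      have hstep : pvStepB S (i, dels) (j, c) = (i, dels ++ [j]) := by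
        unfold pvStepB
        exact if_neg (by rintro ⟨h1, -⟩; omega)
      rw [hstep, IH i hi (dels ++ [j]) (j + 1)]
    · replace hiS : i < S.length := by omega
      rw [if_neg (by omega)]
      have hgL : PySem.List.pyGet? (S.take i ++ c :: rest') (i : Int) = some c := by
        rw [PySem.List.pyGet?_natCast, List.getElem?_append_right (by omega)]
        simp [hT]
      have hgS : PySem.List.pyGet? S (i : Int) = some S[i] := by
        rw [PySem.List.pyGet?_natCast]
        simp [List.getElem?_eq_getElem hiS]
      by_cases hc : S[i] = c
      · rw [if_neg (by rw [hgL, hgS, hc]; simp)]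
        have hLrw : S.take i ++ c :: rest' = S.take (i + 1) ++ rest' := by
          rw [List.take_add_one]
          simp [List.getElem?_eq_getElem hiS, hc]
        rw [hLrw, show (i:Int) + 1 = ((i + 1 : Nat) : Int) from by push_cast; ring]
        have hstep : pvStepB S (i, dels) (j, c) = (i + 1, dels) := by
          unfold pvStepB
          exact if_pos ⟨hiS, by simp [List.getElem?_eq_getElem hiS, hc]⟩
        rw [hstep, IH (i + 1) (by omega) dels (j + 1)]
      · rw [if_pos (by rw [hgL, hgS]; simp; exact fun h => hc h.symm)]
        rw [pvDel S i hi c rest', show (i:Int) - 1 + 1 = (i:Int) from by ring]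
        have hstep : pvStepB S (i, dels) (j, c) = (i, dels ++ [j]) := by
          unfold pvStepB
          refine if_neg ?_
          rintro ⟨-, h2⟩
          rw [List.getElem?_eq_getElem hiS] at h2
          exact hc (Option.some.inj h2)
        rw [hstep, IH i hi (dels ++ [j]) (j + 1)]

-- ===== VERDICT (by name: the statement is the Claim_ definition above) =====
theorem levenshtein_deletions_spec : Claim_equal_levenshtein_deletions := by
  intro s1 s2 _
  unfold Spec_levenshtein_deletions levenshtein_deletions levenshtein_deletions_alt
  split_ifs with h
  · simpa using pvMain s2.toList s1.toList 0 (by omega) [] 0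
  · simpa using pvMain s1.toList s2.toList 0 (by omega) [] 0
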